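-- pv_equiv track=rewrite | github.com/dpranke/pyn | ninja_parser.py | ws_
-- ===== SOURCE A (Python) =====
-- def ws_(msg, start, end):
--     """ (' '|('$' '\n'))+ """
--     p = start
--     err = None
--     while not err and p < end:
--         if msg[p] == ' ':
--             p += 1
--         elif msg[p] == '$' and p < end - 1 and msg[p+1] == '\n':
--             p += 2
--         else:
--             err = "expecting either ' ' or '$\n'"
--     if p == start:
--         return None, p, err
--     else:
--         return None, p, None
-- ===== SOURCE B (Python) =====
-- def ws_(msg, start, end):
--     """ (' '|('$' '\n'))+ """
--     # Every '$\n' pair in the window becomes two spaces (length-preserving),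
--     # so the maximal run of tokens is exactly the leading run of spaces.
--     t = msg[start:end].replace('$\n', '  ')
--     k = len(t) - len(t.lstrip(' '))
--     if k == 0 and start < end:
--         return None, start, "expecting either ' ' or '$\n'"
--     return None, start + k, None
-- ===== Notes on version B (the rewrite author's own statement) =====
-- stated objective: faster
-- what changed: Instead of A's index-by-index while loop with an error flag and bounds checks, B slices the window once, rewrites every '$\n' pair to two spaces with str.replace (length-preserving), and reads the consumed run off as the leading-space count via lstrip; the error is decided arithmetically afterwards.
-- outside the precondition, e.g. on ws_('  ', -1, 2): A returns (None, 2, None), B returns (None, 0, None); on ws_('  ', 0, -1): A returns (None, 0, None), B returns (None, 1, None)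
import Mathlib
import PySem

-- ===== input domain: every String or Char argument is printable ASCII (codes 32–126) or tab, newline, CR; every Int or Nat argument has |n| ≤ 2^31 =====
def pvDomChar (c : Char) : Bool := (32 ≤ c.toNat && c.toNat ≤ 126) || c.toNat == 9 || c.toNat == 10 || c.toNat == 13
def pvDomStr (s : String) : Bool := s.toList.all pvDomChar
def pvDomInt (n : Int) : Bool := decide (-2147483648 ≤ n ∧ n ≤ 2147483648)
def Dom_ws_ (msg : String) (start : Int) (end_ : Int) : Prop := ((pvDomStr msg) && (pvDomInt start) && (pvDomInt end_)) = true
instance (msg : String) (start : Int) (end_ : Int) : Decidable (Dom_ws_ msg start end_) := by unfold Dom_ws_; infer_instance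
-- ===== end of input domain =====

-- B replaces A's index-by-index scan with one str.replace + lstrip pass on the slice (same results on Pre_; constant-factor change).

-- ===== PORT A =====
-- A's while loop: p advances while err is unset; setting err and falling out of the loop = returning (p, some err).
-- pyGet? = none is Python's IndexError (excluded by Pre_); the value returned there is immaterial.
def wsLoop (msg : List Char) (end_ : Int) (p : Int) : Int × Option String :=
  if _h : p < end_ then
    match PySem.List.pyGet? msg p with
    | none => (p, some "expecting either ' ' or '$\n'")
    | some c =>
      if c = ' ' then wsLoop msg end_ (p + 1)
      else if c = '$' ∧ p < end_ - 1 ∧ PySem.List.pyGet? msg (p + 1) = some '\n' then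
        wsLoop msg end_ (p + 2)
      else (p, some "expecting either ' ' or '$\n'")
  else (p, none)
termination_by (end_ - p).toNat
decreasing_by all_goals omega

def ws_ (msg : String) (start : Int) (end_ : Int) : Option String × Int × Option String :=
  let r := wsLoop msg.toList end_ start
  if r.1 = start then (none, r.1, r.2) else (none, r.1, none)

-- ===== PORT B =====
def ws__alt (msg : String) (start : Int) (end_ : Int) : Option String × Int × Option String :=
  let t := PySem.Str.replace (PySem.Str.slice msg (some start) (some end_)) "$\n" "  "
  -- t.lstrip(' ') drops exactly the leading ' ' characters: ported by hand as dropWhile (· == ' ') (exact)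
  let k : Int := (PySem.Str.len t : Int) - ((t.toList.dropWhile (· == ' ')).length : Int)
  if k = 0 ∧ start < end_ then (none, start, some "expecting either ' ' or '$\n'")
  else (none, start + k, none)

-- ===== PRECONDITION & SPEC =====
-- Pre_ admits in-range non-negative bounds, plus any pair whose window is empty (A's loop never runs there);
-- it excludes windows reaching past the end of the string (A raises IndexError whenever the scan reaches it)
-- and non-empty negative-index windows, where Python's wraparound makes A's value an accident of index
-- arithmetic (e.g. A("  ",-1,2) = (None,2,None)).
def Pre_ws_ (msg : String) (start : Int) (end_ : Int) : Prop :=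
  (0 ≤ start ∧ 0 ≤ end_ ∧ end_ ≤ (msg.toList.length : Int)) ∨
  (end_ ≤ start ∧
    PySem.List.clampIdx msg.toList.length end_ ≤ PySem.List.clampIdx msg.toList.length start)
instance (msg : String) (start : Int) (end_ : Int) : Decidable (Pre_ws_ msg start end_) := by
  unfold Pre_ws_; infer_instance

def pvWitness_ws_ : String × Int × Int := (" $\n x", 0, 4)

def Spec_ws_ (msg : String) (start : Int) (end_ : Int) (out : Option String × Int × Option String) : Prop := out = ws__alt msg start end_
instance (msg : String) (start : Int) (end_ : Int) (out : Option String × Int × Option String) : Decidable (Spec_ws_ msg start end_ out) := by unfold Spec_ws_; infer_instance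

-- ===== CLAIM (what is proved, stated in full; the proofs are below) =====
def Claim_equal_ws_ : Prop := ∀ (msg : String) (start : Int) (end_ : Int), Dom_ws_ msg start end_ → Pre_ws_ msg start end_ → Spec_ws_ msg start end_ (ws_ msg start end_)

-- ===== LEMMAS AND PROOFS =====

-- length of the maximal prefix of tokens (' ' | '$\n')
def scanTok : List Char → Nat
  | [] => 0
  | [c] => if c = ' ' then 1 else 0
  | c :: d :: cs =>
    if c = ' ' then 1 + scanTok (d :: cs)
    else if c = '$' ∧ d = '\n' then 2 + scanTok cs
    else 0

-- the effect of s.replace('$\n', '  '): every '$\n' pair becomes two spaces, scanned left to right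
def repDN : List Char → List Char
  | [] => []
  | [c] => [c]
  | c :: d :: cs => if c = '$' ∧ d = '\n' then ' ' :: ' ' :: repDN cs else c :: repDN (d :: cs)

theorem replace_go_eq_repDN (fuel : Nat) : ∀ (l acc : List Char), l.length ≤ fuel →
    PySem.Chars.replace.go ['$', '\n'] [' ', ' '] fuel l acc = acc.reverse ++ repDN l := by
  induction fuel with
  | zero =>
    intro l acc hl
    have : l = [] := by cases l <;> simp_all
    subst this
    simp [PySem.Chars.replace.go, repDN]
  | succ n ih =>
    intro l acc hl
    match l with
    | [] => simp [PySem.Chars.replace.go, repDN]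
    | [c] =>
      have hpre : List.isPrefixOf ['$', '\n'] [c] = false := by simp [List.isPrefixOf]
      rw [PySem.Chars.replace.go]
      simp only [hpre, Bool.false_eq_true, if_false]
      rw [PySem.Chars.replace.go.eq_def]
      match n with
      | 0 => simp [repDN]
      | m + 1 => simp [repDN]
    | c :: d :: cs =>
      by_cases h : c = '$' ∧ d = '\n'
      · obtain ⟨hc, hd⟩ := h
        have hpre : List.isPrefixOf ['$', '\n'] (c :: d :: cs) = true := by
          simp [List.isPrefixOf, hc, hd]
        rw [PySem.Chars.replace.go]
        simp only [hpre, if_true]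
        have e1 : List.drop (['$', '\n'].length) (c :: d :: cs) = cs := rfl
        have e2 : [' ', ' '].reverse ++ acc = ' ' :: ' ' :: acc := rfl
        rw [e1, e2, ih cs (' ' :: ' ' :: acc) (by simp at hl ⊢; omega)]
        simp [repDN, hc, hd]
      · have hpre : List.isPrefixOf ['$', '\n'] (c :: d :: cs) = false := by
          simp [List.isPrefixOf]
          intro hc hd; exact h ⟨hc.symm, hd.symm⟩
        rw [PySem.Chars.replace.go]
        simp only [hpre, Bool.false_eq_true, if_false]
        rw [ih (d :: cs) (c :: acc) (by simp at hl ⊢; omega)]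
        simp [repDN, h]

theorem replace_eq_repDN (l : List Char) :
    PySem.Chars.replace l ['$', '\n'] [' ', ' '] = repDN l := by
  rw [PySem.Chars.replace]
  simp only [List.isEmpty_cons, Bool.false_eq_true, if_false]
  exact replace_go_eq_repDN l.length l [] le_rfl

theorem takeWhile_repDN (l : List Char) :
    (List.takeWhile (· == ' ') (repDN l)).length = scanTok l := by
  induction l using repDN.induct with
  | case1 => simp [repDN, scanTok]
  | case2 c =>
    by_cases hc : c = ' ' <;> simp [repDN, scanTok, List.takeWhile, hc]
  | case3 c d cs h ih =>
    have hc' : ¬ c = ' ' := by rw [h.1]; decide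
    simp only [repDN, if_pos h, scanTok, if_neg hc']
    simp [List.takeWhile, ih]
    omega
  | case4 c d cs h ih =>
    by_cases hc : c = ' '
    · subst hc
      simp only [repDN, if_neg h, scanTok]
      simp [List.takeWhile, ih]
      omega
    · have hb : (c == ' ') = false := by simp [hc]
      simp only [repDN, if_neg h, scanTok, if_neg hc]
      simp [List.takeWhile, hb]

theorem length_sub_dropWhile (l : List Char) :
    l.length - (l.dropWhile (· == ' ')).length = (l.takeWhile (· == ' ')).length := by
  have h := congrArg List.length (List.takeWhile_append_dropWhile (p := (· == ' ')) (l := l))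
  rw [List.length_append] at h
  omega

theorem scanTok_space_cons (rest : List Char) : scanTok (' ' :: rest) = 1 + scanTok rest := by
  cases rest <;> simp [scanTok]

theorem scanTok_dollar_nl (rest : List Char) : scanTok ('$' :: '\n' :: rest) = 2 + scanTok rest := by
  simp [scanTok]

-- A's loop computes start + scanTok of the window, with the error set iff it stopped before end_.
theorem wsLoop_eq (msg : List Char) (e : Int) (he : e ≤ (msg.length : Int)) :
    ∀ (n : Nat) (q : Nat), ((q : Int) ≤ e) → e.toNat - q = n →
    wsLoop msg e q =
      ((q : Int) + scanTok ((msg.drop q).take (e.toNat - q)),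
       if (q : Int) + scanTok ((msg.drop q).take (e.toNat - q)) < e then
         some "expecting either ' ' or '$\n'" else none) := by
  intro n
  induction n using Nat.strong_induction_on with
  | _ n ih =>
    intro q hq hn
    by_cases hlt : (q : Int) < e
    · have hql : q < msg.length := by omega
      have hdrop : msg.drop q = msg[q] :: msg.drop (q + 1) :=
        List.drop_eq_getElem_cons hql
      have hget : PySem.List.pyGet? msg (q : Int) = some msg[q] := by
        simp [PySem.List.pyGet?_natCast, List.getElem?_eq_getElem hql]
      have hc1 : ((q : Int) + 1) = (((q + 1 : Nat)) : Int) := by push_cast; ring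
      rw [wsLoop]
      simp only [dif_pos hlt, hget]
      by_cases hsp : msg[q] = ' '
      · -- space: consume one
        have h1 : (((q + 1 : Nat)) : Int) ≤ e := by push_cast; omega
        rw [if_pos hsp, hc1, ih (e.toNat - (q + 1)) (by omega) (q + 1) h1 rfl]
        have hw : (msg.drop q).take (e.toNat - q)
            = ' ' :: ((msg.drop (q + 1)).take (e.toNat - (q + 1))) := by
          rw [hdrop, hsp]
          have h3 : e.toNat - q = (e.toNat - (q + 1)) + 1 := by omega
          rw [h3, List.take_succ_cons]
        rw [hw, scanTok_space_cons]
        have harith : (((q + 1 : Nat)) : Int) + (scanTok ((msg.drop (q + 1)).take (e.toNat - (q + 1))) : Int)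
            = (q : Int) + ((1 + scanTok ((msg.drop (q + 1)).take (e.toNat - (q + 1))) : Nat) : Int) := by
          push_cast; ring
        rw [harith]
      · rw [if_neg hsp]
        by_cases hdl : msg[q] = '$' ∧ (q : Int) < e - 1 ∧ PySem.List.pyGet? msg ((q : Int) + 1) = some '\n'
        · -- '$\n': consume two
          obtain ⟨hc, hlt1, hnl⟩ := hdl
          have hq1l : q + 1 < msg.length := by omega
          have hnl' : msg[q + 1] = '\n' := by
            have htmp := hnl
            rw [hc1, PySem.List.pyGet?_natCast, List.getElem?_eq_getElem hq1l] at htmp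
            exact Option.some.inj htmp
          rw [if_pos ⟨hc, hlt1, hnl⟩]
          have h2 : (((q + 2 : Nat)) : Int) ≤ e := by push_cast; omega
          have hc2 : ((q : Int) + 2) = (((q + 2 : Nat)) : Int) := by push_cast; ring
          rw [hc2, ih (e.toNat - (q + 2)) (by omega) (q + 2) h2 rfl]
          have hdrop1 : msg.drop (q + 1) = msg[q + 1] :: msg.drop (q + 2) :=
            List.drop_eq_getElem_cons hq1l
          have hw : (msg.drop q).take (e.toNat - q)
              = '$' :: '\n' :: ((msg.drop (q + 2)).take (e.toNat - (q + 2))) := by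
            rw [hdrop, hc, hdrop1, hnl']
            have h3 : e.toNat - q = ((e.toNat - (q + 2)) + 1) + 1 := by omega
            rw [h3, List.take_succ_cons, List.take_succ_cons]
          rw [hw, scanTok_dollar_nl]
          have harith : (((q + 2 : Nat)) : Int) + (scanTok ((msg.drop (q + 2)).take (e.toNat - (q + 2))) : Int)
              = (q : Int) + ((2 + scanTok ((msg.drop (q + 2)).take (e.toNat - (q + 2))) : Nat) : Int) := by
            push_cast; ring
          rw [harith]
        · -- stuck: error
          rw [if_neg hdl]
          have hscan : scanTok ((msg.drop q).take (e.toNat - q)) = 0 := by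
            have h3 : e.toNat - q = (e.toNat - (q + 1)) + 1 := by omega
            rw [hdrop, h3, List.take_succ_cons]
            rcases hrest : (msg.drop (q + 1)).take (e.toNat - (q + 1)) with _ | ⟨d₀, rest'⟩
            · simp [scanTok, hsp]
            · have hq1e : q + 1 < e.toNat := by
                by_contra hcon
                have h0 : e.toNat - (q + 1) = 0 := by omega
                rw [h0] at hrest; simp at hrest
              have hq1l : q + 1 < msg.length := by omega
              have hd₀ : d₀ = msg[q + 1] := by
                have hdrop1 : msg.drop (q + 1) = msg[q + 1] :: msg.drop (q + 2) :=
                  List.drop_eq_getElem_cons hq1l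
                have h4 : e.toNat - (q + 1) = (e.toNat - (q + 2)) + 1 := by omega
                rw [hdrop1, h4, List.take_succ_cons] at hrest
                exact (List.cons.injEq _ _ _ _ ▸ hrest).1.symm
              have hne : ¬ (msg[q] = '$' ∧ d₀ = '\n') := by
                intro hab
                apply hdl
                refine ⟨hab.1, by omega, ?_⟩
                rw [hc1, PySem.List.pyGet?_natCast, List.getElem?_eq_getElem hq1l]
                exact congrArg some (hd₀ ▸ hab.2)
              simp only [scanTok, if_neg hsp, if_neg hne]
          rw [hscan]
          simp [hlt]
    · -- loop guard false: q ≥ e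
      rw [wsLoop]
      have he0 : e.toNat - q = 0 := by omega
      rw [dif_neg hlt, he0]
      simp [scanTok, hlt]

theorem ws__spec : Claim_equal_ws_ := by
  intro msg start end_ _hdom hpre
  unfold Spec_ws_
  simp only [ws_, ws__alt]
  rcases hpre with ⟨hs, he0, hel⟩ | ⟨hse, hcl⟩
  swap
  · -- empty window: the loop never runs and B's slice is empty
    have hsegnil : (PySem.Str.slice msg (some start) (some end_)).toList = [] := by
      rw [PySem.Str.toList_slice, PySem.Chars.slice_eq_listSlice]
      apply List.eq_nil_of_length_eq_zero
      rw [PySem.List.length_slice]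
      omega
    have ht : (PySem.Str.replace (PySem.Str.slice msg (some start) (some end_)) "$\n" "  ").toList = [] := by
      rw [PySem.Str.toList_replace]
      have h1 : ("$\n" : String).toList = ['$', '\n'] := by decide
      have h2 : ("  " : String).toList = [' ', ' '] := by decide
      rw [h1, h2, hsegnil, replace_eq_repDN]
      simp [repDN]
    have hk : (PySem.Str.len (PySem.Str.replace (PySem.Str.slice msg (some start) (some end_)) "$\n" "  ") : Int)
        - (((PySem.Str.replace (PySem.Str.slice msg (some start) (some end_)) "$\n" "  ").toList.dropWhile (· == ' ')).length : Int)
        = 0 := by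
      rw [PySem.Str.len_eq, ht]
      simp
    have hA : wsLoop msg.toList end_ start = (start, none) := by
      rw [wsLoop]; exact dif_neg (by omega)
    have hlt' : ¬ start < end_ := by omega
    rw [hk, hA]
    simp [hlt']
  -- normalise B's string pipeline to lists
  have hseg : (PySem.Str.slice msg (some start) (some end_)).toList
      = (msg.toList.drop start.toNat).take (end_.toNat - start.toNat) := by
    rw [PySem.Str.toList_slice, PySem.Chars.slice_eq_listSlice]
    exact PySem.List.slice_toNat _ hs he0
  set w : List Char := (msg.toList.drop start.toNat).take (end_.toNat - start.toNat) with hw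
  have ht : (PySem.Str.replace (PySem.Str.slice msg (some start) (some end_)) "$\n" "  ").toList
      = repDN w := by
    rw [PySem.Str.toList_replace]
    have h1 : ("$\n" : String).toList = ['$', '\n'] := by decide
    have h2 : ("  " : String).toList = [' ', ' '] := by decide
    rw [h1, h2, hseg, replace_eq_repDN]
  have hklen : (PySem.Str.len (PySem.Str.replace (PySem.Str.slice msg (some start) (some end_)) "$\n" "  ") : Int)
      - (((PySem.Str.replace (PySem.Str.slice msg (some start) (some end_)) "$\n" "  ").toList.dropWhile (· == ' ')).length : Int)
      = (scanTok w : Int) := by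
    rw [PySem.Str.len_eq, ht]
    have h3 := length_sub_dropWhile (repDN w)
    have h4 := takeWhile_repDN w
    have h5 : (List.dropWhile (· == ' ') (repDN w)).length ≤ (repDN w).length :=
      List.length_dropWhile_le _ _
    omega
  rw [hklen]
  by_cases hse : start ≤ end_
  · -- A's loop runs over the window
    have hloop := wsLoop_eq msg.toList end_ (by exact_mod_cast hel) (end_.toNat - start.toNat)
        start.toNat (by omega) rfl
    have hstart : ((start.toNat : Nat) : Int) = start := Int.toNat_of_nonneg hs
    rw [hstart] at hloop
    rw [← hw] at hloop
    rw [hloop]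
    by_cases hz : scanTok w = 0
    · rw [hz]
      by_cases hlt : start < end_ <;> simp [hlt]
    · have hne : start + (scanTok w : Int) ≠ start := by
        have hpos : (0 : Int) < (scanTok w : Int) := by exact_mod_cast Nat.pos_of_ne_zero hz
        omega
      have hkne : ¬ ((scanTok w : Int) = 0 ∧ start < end_) := by
        intro ⟨h, _⟩; exact hz (by exact_mod_cast h)
      rw [if_neg hkne]
      split <;> simp_all
  · -- end_ < start: the loop guard is false and the window is empty
    have hw0 : w = [] := by
      rw [hw]
      have h0 : end_.toNat - start.toNat = 0 := by omega
      rw [h0, List.take_zero]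
    have hA : wsLoop msg.toList end_ start = (start, none) := by
      rw [wsLoop]; exact dif_neg (by omega)
    have hlt' : ¬ start < end_ := by omega
    rw [hA, hw0]
    simp [scanTok, hlt']
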